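-- pv_equiv track=rewrite | github.com/cirosantilli/project-euler-solutions | solvers/748.py | fourth_root_floor
-- ===== SOURCE A (Python) =====
-- import math
--
-- def fourth_root_floor(n: int) -> int:
--     """Return floor(n^(1/4)) for n >= 0, using integer arithmetic."""
--     if n <= 0:
--         return 0
--     x = math.isqrt(math.isqrt(n))
--     while (x + 1) ** 4 <= n:
--         x += 1
--     while x**4 > n:
--         x -= 1
--     return x
-- ===== SOURCE B (Python) =====
-- def fourth_root_floor(n: int) -> int:
--     """Return floor(n^(1/4)) for n >= 0, using integer arithmetic."""
--     if n <= 0: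
--         return 0
--     lo, hi = 0, n
--     while lo < hi:
--         mid = (lo + hi + 1) // 2
--         if mid ** 4 <= n:
--             lo = mid
--         else:
--             hi = mid - 1
--     return lo
-- ===== Notes on version B (the rewrite author's own statement) =====
-- stated objective: alternative
-- what changed: Replaced the isqrt-based estimate with its correction loops by a plain binary search for the largest integer whose fourth power does not exceed n.
import Mathlib
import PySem

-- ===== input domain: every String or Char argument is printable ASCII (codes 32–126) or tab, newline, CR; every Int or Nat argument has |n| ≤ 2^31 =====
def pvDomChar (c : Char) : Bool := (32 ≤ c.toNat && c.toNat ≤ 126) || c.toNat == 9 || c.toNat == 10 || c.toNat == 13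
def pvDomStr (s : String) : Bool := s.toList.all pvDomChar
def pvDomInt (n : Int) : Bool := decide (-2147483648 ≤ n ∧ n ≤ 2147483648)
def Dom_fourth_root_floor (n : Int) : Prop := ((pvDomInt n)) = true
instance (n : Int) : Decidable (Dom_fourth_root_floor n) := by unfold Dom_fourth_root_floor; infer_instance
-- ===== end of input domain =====

-- B replaces A's isqrt-estimate-plus-correction-loops by a binary search (alternative algorithm).


-- ===== PORT A =====
-- the 'while (x+1)**4 <= n: x += 1' loop; fuel only guards totality (the loop body
-- only runs while its condition holds, exactly as in Python; m+1 steps always suffice)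
def pvUpA (m : Nat) (x : Nat) (fuel : Nat) : Nat :=
  match fuel with
  | 0 => x
  | f + 1 => if (x + 1) ^ 4 ≤ m then pvUpA m (x + 1) f else x

-- the 'while x**4 > n: x -= 1' loop (for n ≥ 1 it never goes below 0)
def pvDownA (m : Nat) (x : Nat) : Nat :=
  match x with
  | 0 => 0
  | y + 1 => if m < (y + 1) ^ 4 then pvDownA m y else y + 1

def fourth_root_floor (n : Int) : Int :=
  if n ≤ 0 then 0
  else
    -- n ≥ 1 here, so computing on n.toNat is exact; math.isqrt = Nat.sqrt
    (pvDownA n.toNat (pvUpA n.toNat (Nat.sqrt (Nat.sqrt n.toNat)) (n.toNat + 1)) : Int)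

-- ===== PORT B =====
-- the 'while lo < hi' binary-search loop of Source B, mid = (lo+hi+1)//2 (all values stay ≥ 0);
-- fuel only guards totality (hi-lo+1 steps always suffice since the interval shrinks)
def pvBS (m : Nat) (fuel : Nat) (lo : Nat) (hi : Nat) : Nat :=
  match fuel with
  | 0 => lo
  | f + 1 =>
    if lo < hi then
      if ((lo + hi + 1) / 2) ^ 4 ≤ m then pvBS m f ((lo + hi + 1) / 2) hi
      else pvBS m f lo ((lo + hi + 1) / 2 - 1)
    else lo

def fourth_root_floor_alt (n : Int) : Int :=
  if n ≤ 0 then 0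
  else (pvBS n.toNat (n.toNat + 1) 0 n.toNat : Int)

-- ===== PRECONDITION & SPEC =====
def Spec_fourth_root_floor (n : Int) (out : Int) : Prop := out = fourth_root_floor_alt n
instance (n : Int) (out : Int) : Decidable (Spec_fourth_root_floor n out) := by unfold Spec_fourth_root_floor; infer_instance

-- ===== CLAIM (what is proved, stated in full; the proofs are below) =====
def Claim_equal_fourth_root_floor : Prop := ∀ (n : Int), Dom_fourth_root_floor n → Spec_fourth_root_floor n (fourth_root_floor n)

-- ===== LEMMAS AND PROOFS =====

-- r = sqrt (sqrt m) is the fourth-root floor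
theorem pvR_le (m : Nat) : (Nat.sqrt (Nat.sqrt m)) ^ 4 ≤ m := by
  have h1 := Nat.sqrt_le' (Nat.sqrt m)
  have h2 := Nat.sqrt_le' m
  calc (Nat.sqrt (Nat.sqrt m)) ^ 4
      = (Nat.sqrt (Nat.sqrt m) ^ 2) ^ 2 := by ring
    _ ≤ (Nat.sqrt m) ^ 2 := Nat.pow_le_pow_left h1 2
    _ ≤ m := h2

theorem pvR_lt (m : Nat) : m < (Nat.sqrt (Nat.sqrt m) + 1) ^ 4 := by
  have h1 := Nat.lt_succ_sqrt' (Nat.sqrt m)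
  have h2 := Nat.lt_succ_sqrt' m
  rw [Nat.succ_eq_add_one] at h1 h2
  calc m < (Nat.sqrt m + 1) ^ 2 := h2
    _ ≤ ((Nat.sqrt (Nat.sqrt m) + 1) ^ 2) ^ 2 := Nat.pow_le_pow_left (by omega) 2
    _ = (Nat.sqrt (Nat.sqrt m) + 1) ^ 4 := by ring

theorem pvUpA_id (m : Nat) : ∀ (fuel x : Nat), m < (x + 1) ^ 4 → pvUpA m x fuel = x := by
  intro fuel x h
  cases fuel with
  | zero => rfl
  | succ f => unfold pvUpA; rw [if_neg (by omega)]

theorem pvDownA_id (m x : Nat) (h : x ^ 4 ≤ m) : pvDownA m x = x := by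
  cases x with
  | zero => rfl
  | succ y => unfold pvDownA; rw [if_neg (by omega)]

theorem pvBS_eq (m r : Nat) (hr4 : r ^ 4 ≤ m) (hr1 : m < (r + 1) ^ 4) :
    ∀ (fuel lo hi : Nat), hi - lo < fuel → lo ≤ r → r ≤ hi → pvBS m fuel lo hi = r := by
  intro fuel
  induction fuel with
  | zero => intro lo hi hk; omega
  | succ f ih =>
    intro lo hi hk h1 h2
    unfold pvBS
    by_cases hlt : lo < hi
    · rw [if_pos hlt]
      have hmidlo : lo < (lo + hi + 1) / 2 := by omega
      have hmidhi : (lo + hi + 1) / 2 ≤ hi := by omega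
      by_cases h4 : ((lo + hi + 1) / 2) ^ 4 ≤ m
      · rw [if_pos h4]
        have hmr : (lo + hi + 1) / 2 ≤ r := by
          by_contra hc
          have hle : r + 1 ≤ (lo + hi + 1) / 2 := by omega
          have := Nat.pow_le_pow_left hle 4
          omega
        exact ih ((lo + hi + 1) / 2) hi (by omega) hmr h2
      · rw [if_neg h4]
        have hmr : r ≤ (lo + hi + 1) / 2 - 1 := by
          by_contra hc
          have hle : (lo + hi + 1) / 2 ≤ r := by omega
          have := Nat.pow_le_pow_left hle 4
          omega
        exact ih lo ((lo + hi + 1) / 2 - 1) (by omega) h1 hmr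
    · rw [if_neg hlt]; omega

-- ===== VERDICT (by name: the statement is the Claim_ definition above) =====
theorem fourth_root_floor_spec : Claim_equal_fourth_root_floor := by
  intro n _
  unfold Spec_fourth_root_floor fourth_root_floor fourth_root_floor_alt
  by_cases hn : n ≤ 0
  · rw [if_pos hn, if_pos hn]
  · rw [if_neg hn, if_neg hn]
    set m := n.toNat with hm
    set r := Nat.sqrt (Nat.sqrt m) with hr
    have h4 : r ^ 4 ≤ m := pvR_le m
    have h1 : m < (r + 1) ^ 4 := pvR_lt m
    have hA : pvDownA m (pvUpA m r (m + 1)) = r := by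
      rw [pvUpA_id m (m + 1) r h1]; exact pvDownA_id m r h4
    have hrm : r ≤ m := le_trans (Nat.le_self_pow (by norm_num) r) h4
    have hB : pvBS m (m + 1) 0 m = r := pvBS_eq m r h4 h1 (m + 1) 0 m (by omega) (Nat.zero_le r) hrm
    rw [hA, hB]
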